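-- pv_equiv track=rewrite | github.com/Radcliffe/OEIS-Python | src/oeispy/A333/A333325.py | a333325
-- ===== SOURCE A (Python) =====
-- def a333325(n):
--   seq = []
--   for k in range(n):
--     options = []
--     l = len(seq) + 1
--     for m in range(3): # base
--       for i in range(l // 2, -1, -1):
--         if seq[l - 2 * i: l - i] == seq[l - i:] + [m]: break
--       options.append(2 * i)
--     seq.append(options.index(min(options)))
--   return seq
-- ===== SOURCE B (Python) =====
-- def a333325(n):
--     # Key fact: for i >= 1 the block test seq[l-2i:l-i] == seq[l-i:] + [m] splits into a
--     # candidate-independent comparison seq[l-2i:l-i-1] == seq[l-i:] plus seq[l-i-1] == m,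
--     # so ONE descending scan over i finds the best score for all three candidates at once.
--     seq = []
--     for _ in range(n):
--         l = len(seq) + 1
--         s0 = s1 = s2 = 0
--         for i in range(l // 2, 0, -1):
--             if seq[l - 2 * i: l - i - 1] == seq[l - i:]:
--                 m = seq[l - i - 1]
--                 if m == 0:
--                     if s0 == 0:
--                         s0 = 2 * i
--                 elif m == 1:
--                     if s1 == 0:
--                         s1 = 2 * i
--                 elif m == 2:
--                     if s2 == 0:
--                         s2 = 2 * i
--         if s0 <= s1 and s0 <= s2:
--             seq.append(0)
--         elif s1 <= s2:
--             seq.append(1)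
--         else:
--             seq.append(2)
--     return seq
-- ===== Notes on version B (the rewrite author's own statement) =====
-- stated objective: faster
-- what changed: One descending scan over block lengths i replaces the three per-candidate scans: for i>=1 the test seq[l-2i:l-i]==seq[l-i:]+[m] factors into a candidate-independent block comparison plus m==seq[l-i-1], so each i determines its unique matching candidate and the three scores are collected in a single pass; the final options.index(min(options)) becomes a three-way comparison chain.
import Mathlib
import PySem

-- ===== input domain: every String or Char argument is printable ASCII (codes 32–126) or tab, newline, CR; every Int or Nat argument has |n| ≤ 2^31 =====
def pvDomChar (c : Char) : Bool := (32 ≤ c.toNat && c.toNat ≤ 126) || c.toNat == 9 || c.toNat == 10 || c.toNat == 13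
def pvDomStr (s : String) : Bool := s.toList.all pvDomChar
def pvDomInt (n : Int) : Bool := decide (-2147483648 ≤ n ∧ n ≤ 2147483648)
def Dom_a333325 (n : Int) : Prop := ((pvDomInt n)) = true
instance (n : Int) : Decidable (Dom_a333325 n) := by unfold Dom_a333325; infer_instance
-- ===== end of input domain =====

-- B collapses A's three per-candidate descending scans into one scan (the matching candidate at each
-- block length is determined by seq[l-i-1]); measured constant-factor speed-up, return value identical.


-- ===== PORT A =====
-- seq[l-2i:l-i] == seq[l-i:] + [m]
def pvCondA (seq : List Int) (l m i : Int) : Bool :=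
  PySem.List.slice seq (some (l - 2 * i)) (some (l - i)) ==
    PySem.List.slice seq (some (l - i)) none ++ [m]

-- 'for i in range(l//2,-1,-1): if cond: break' and then read the leftover loop variable i
def pvScanA (seq : List Int) (l m : Int) : List Int → Int
  | [] => 0      -- unreachable: the range always contains 0
  | i :: rest =>
      if pvCondA seq l m i then i
      else match rest with
           | [] => i          -- loop ended without break; i keeps its last value
           | _ :: _ => pvScanA seq l m rest

def pvStepA (seq : List Int) : List Int :=
  let l : Int := (seq.length : Int) + 1
  let options := (PySem.List.pyRange 0 3 1).foldl (fun opts m =>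
      opts ++ [2 * pvScanA seq l m (PySem.List.pyRange (PySem.Int.floordiv l 2) (-1) (-1))]) []
  let mn := (PySem.List.min? options (fun x => x)).getD 0      -- options is always nonempty
  seq ++ [(((PySem.List.index? options mn).getD 0 : Nat) : Int)]

def a333325 (n : Int) : List Int :=
  (PySem.List.pyRange 0 n 1).foldl (fun seq _ => pvStepA seq) []

-- ===== PORT B =====
-- seq[l-2i:l-i-1] == seq[l-i:]
def pvCondB (seq : List Int) (l i : Int) : Bool :=
  PySem.List.slice seq (some (l - 2 * i)) (some (l - i - 1)) ==
    PySem.List.slice seq (some (l - i)) none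

-- one iteration of B's single descending loop, updating the three scores
def pvUpd (seq : List Int) (l : Int) (s : Int × Int × Int) (i : Int) : Int × Int × Int :=
  if pvCondB seq l i then
    -- the index l-i-1 is always in range here (1 ≤ i ≤ l//2), so pyGetD is exact
    let m := PySem.List.pyGetD seq (l - i - 1) 0
    if m == 0 then (if s.1 == 0 then (2 * i, s.2.1, s.2.2) else s)
    else if m == 1 then (if s.2.1 == 0 then (s.1, 2 * i, s.2.2) else s)
    else if m == 2 then (if s.2.2 == 0 then (s.1, s.2.1, 2 * i) else s)
    else s
  else s

def pvStepB (seq : List Int) : List Int :=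
  let l : Int := (seq.length : Int) + 1
  let s := (PySem.List.pyRange (PySem.Int.floordiv l 2) 0 (-1)).foldl (pvUpd seq l) (0, 0, 0)
  seq ++ [if s.1 ≤ s.2.1 ∧ s.1 ≤ s.2.2 then 0 else if s.2.1 ≤ s.2.2 then 1 else 2]

def a333325_alt (n : Int) : List Int :=
  (PySem.List.pyRange 0 n 1).foldl (fun seq _ => pvStepB seq) []

-- ===== PRECONDITION & SPEC =====
def Spec_a333325 (n : Int) (out : List Int) : Prop := out = a333325_alt n
instance (n : Int) (out : List Int) : Decidable (Spec_a333325 n out) := by unfold Spec_a333325; infer_instance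

-- ===== CLAIM (what is proved, stated in full; the proofs are below) =====
def Claim_equal_a333325 : Prop := ∀ (n : Int), Dom_a333325 n → Spec_a333325 n (a333325 n)

-- ===== LEMMAS AND PROOFS =====

-- first match in a descending list of candidate block lengths (0 if none)
def pvFM (seq : List Int) (l m : Int) : List Int → Int
  | [] => 0
  | i :: rest => if pvCondA seq l m i then i else pvFM seq l m rest

theorem pvBeqApp (xs ys : List Int) (a b : Int) :
    (xs ++ [a] == ys ++ [b]) = ((xs == ys) && (a == b)) := by
  rw [beq_eq_decide, beq_eq_decide, beq_eq_decide]
  simp [List.append_singleton_inj]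

-- at i = 0 the break test compares [] with [m]: never true
theorem pvCondA_zero (seq : List Int) (m : Int) :
    pvCondA seq ((seq.length : Int) + 1) m 0 = false := by
  unfold pvCondA
  have h1 : ((seq.length:Int)+1) - 2*0 = ((seq.length + 1 : Nat) : Int) := by push_cast; ring
  have h2 : ((seq.length:Int)+1) - 0 = ((seq.length + 1 : Nat) : Int) := by push_cast; ring
  rw [h1, h2, PySem.List.slice_natCast, PySem.List.slice_from_natCast]
  simp

-- A's leftover-variable scan over the full range [l//2..0] is the first match over [l//2..1]
theorem pvScanA_eq_pvFM (seq : List Int) (m : Int) (L : List Int) :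
    pvScanA seq ((seq.length : Int) + 1) m (L ++ [0]) =
      pvFM seq ((seq.length : Int) + 1) m L := by
  induction L with
  | nil => simp [pvScanA, pvFM, pvCondA_zero]
  | cons i rest ih =>
      cases rest with
      | nil => simp [pvScanA, pvFM, pvCondA_zero]
      | cons j rs => simp only [List.cons_append, pvScanA, pvFM] at ih ⊢; rw [ih]

-- range(h,-1,-1) = range(h,0,-1) + [0]
theorem pvRange_split (h : Int) (hh : 0 ≤ h) :
    PySem.List.pyRange h (-1) (-1) = PySem.List.pyRange h 0 (-1) ++ [0] := by
  rw [PySem.List.pyRange_neg_one, PySem.List.pyRange_neg_one]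
  have : (h - -1).toNat = (h - 0).toNat + 1 := by omega
  rw [this, List.range_succ]
  simp
  omega

-- the key factorisation: for i ≥ 1 the break test splits into a candidate-independent
-- block comparison and the last-element test seq[l-i-1] == m
theorem pvCondA_split (seq : List Int) (m i : Int) (h1 : 1 ≤ i)
    (h2 : 2 * i ≤ (seq.length : Int) + 1) :
    pvCondA seq ((seq.length : Int) + 1) m i =
      (pvCondB seq ((seq.length : Int) + 1) i &&
        (PySem.List.pyGetD seq ((seq.length : Int) + 1 - i - 1) 0 == m)) := by
  unfold pvCondA pvCondB
  set L := seq.length with hL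
  obtain ⟨k, hk⟩ : ∃ k : Nat, i = (k : Int) + 1 := ⟨(i - 1).toNat, by omega⟩
  subst hk
  have hkL : 2 * k + 1 ≤ L := by omega
  have ha : (L:Int) + 1 - 2*((k:Int)+1) = (((L - 2*k - 1 : Nat)) : Int) := by omega
  have hc : (L:Int) + 1 - ((k:Int)+1) - 1 = (((L - k - 1 : Nat)) : Int) := by omega
  have hb : (L:Int) + 1 - ((k:Int)+1) = (((L - k : Nat)) : Int) := by omega
  rw [ha, hc, hb, PySem.List.slice_natCast, PySem.List.slice_natCast, PySem.List.slice_from_natCast,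
      PySem.List.pyGetD_eq_getElem seq 0 (by omega) (by omega)]
  simp only [Int.toNat_natCast]
  have e1 : L - k - (L - 2*k - 1) = k + 1 := by omega
  have e2 : L - k - 1 - (L - 2*k - 1) = k := by omega
  rw [e1, e2, List.take_add_one]
  have hlt : k < (List.drop (L - 2*k - 1) seq).length := by simp; omega
  rw [List.getElem?_eq_getElem hlt]
  have hgeteq : (List.drop (L - 2*k - 1) seq)[k]'hlt = seq[L - k - 1]'(by omega) := by
    rw [List.getElem_drop]; congr 1; omega
  rw [hgeteq]
  simp only [Option.toList_some]
  exact pvBeqApp _ _ _ _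

-- B's single-pass fold computes the three first-match scores at once
theorem pvFoldB_spec (seq : List Int) (L : List Int)
    (hL : ∀ i ∈ L, 1 ≤ i ∧ 2 * i ≤ (seq.length : Int) + 1) :
    ∀ s0 s1 s2 : Int,
    L.foldl (pvUpd seq ((seq.length : Int) + 1)) (s0, s1, s2) =
      ((if s0 = 0 then 2 * pvFM seq ((seq.length : Int) + 1) 0 L else s0),
       (if s1 = 0 then 2 * pvFM seq ((seq.length : Int) + 1) 1 L else s1),
       (if s2 = 0 then 2 * pvFM seq ((seq.length : Int) + 1) 2 L else s2)) := by
  induction L with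
  | nil =>
      intro s0 s1 s2
      simp only [List.foldl_nil, pvFM, mul_zero]
      refine Prod.ext ?_ (Prod.ext ?_ ?_) <;> · simp only []; split <;> simp_all
  | cons i rest ih =>
      intro s0 s1 s2
      obtain ⟨hi1, hi2⟩ := hL i (List.mem_cons_self ..)
      have hrest : ∀ j ∈ rest, 1 ≤ j ∧ 2 * j ≤ (seq.length : Int) + 1 :=
        fun j hj => hL j (List.mem_cons_of_mem _ hj)
      have ih' := ih hrest
      have hne : (2 * i : Int) ≠ 0 := by omega
      rw [List.foldl_cons]
      simp only [pvFM, pvCondA_split _ _ _ hi1 hi2]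
      rw [pvUpd]
      by_cases hB : pvCondB seq ((seq.length : Int) + 1) i
      · simp only [hB, if_true, Bool.true_and]
        set g := PySem.List.pyGetD seq ((seq.length : Int) + 1 - i - 1) 0 with hg
        rcases eq_or_ne g 0 with hg0 | hg0
        · simp only [hg0, show ((0:Int) == 0) = true from rfl,
            show ((0:Int) == 1) = false from rfl, show ((0:Int) == 2) = false from rfl,
            if_true, Bool.false_eq_true, if_false]
          by_cases hs0 : s0 = 0
          · simp only [hs0, show ((0:Int) == 0) = true from rfl, if_true, ih']
            simp [hne]
          · have : (s0 == (0:Int)) = false := by simp [hs0]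
            simp only [this, Bool.false_eq_true, if_false, ih', hs0]
        · rcases eq_or_ne g 1 with hg1 | hg1
          · simp only [hg1, show ((1:Int) == 0) = false from rfl,
              show ((1:Int) == 1) = true from rfl, show ((1:Int) == 2) = false from rfl,
              if_true, Bool.false_eq_true, if_false]
            by_cases hs1 : s1 = 0
            · simp only [hs1, show ((0:Int) == 0) = true from rfl, if_true, ih']
              simp [hne]
            · have : (s1 == (0:Int)) = false := by simp [hs1]
              simp only [this, Bool.false_eq_true, if_false, ih', hs1]
          · rcases eq_or_ne g 2 with hg2 | hg2
            · have t0 : (g == (0:Int)) = false := by simp [hg0]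
              have t1 : (g == (1:Int)) = false := by simp [hg1]
              have t2 : (g == (2:Int)) = true := by simp [hg2]
              simp only [t0, t1, t2, if_true, Bool.false_eq_true, if_false]
              by_cases hs2 : s2 = 0
              · simp only [hs2, show ((0:Int) == 0) = true from rfl, if_true, ih']
                simp [hne]
              · have : (s2 == (0:Int)) = false := by simp [hs2]
                simp only [this, Bool.false_eq_true, if_false, ih', hs2]
            · have t0 : (g == (0:Int)) = false := by simp [hg0]
              have t1 : (g == (1:Int)) = false := by simp [hg1]
              have t2 : (g == (2:Int)) = false := by simp [hg2]
              simp only [t0, t1, t2, Bool.false_eq_true, if_false]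
              exact ih' s0 s1 s2
      · have hBf : pvCondB seq ((seq.length : Int) + 1) i = false := by simpa using hB
        simp only [hBf, Bool.false_eq_true, if_false, Bool.false_and]
        exact ih' s0 s1 s2

-- Python's options.index(min(options)) on a 3-element list is the ≤-comparison chain
theorem pvIdxMin3 (o0 o1 o2 : Int) :
    (((PySem.List.index? [o0, o1, o2]
        ((PySem.List.min? [o0, o1, o2] (fun x => x)).getD 0)).getD 0 : Nat) : Int) =
      if o0 ≤ o1 ∧ o0 ≤ o2 then 0 else if o1 ≤ o2 then 1 else 2 := by
  rw [PySem.List.min?_id_cons]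
  simp only [List.foldl_cons, List.foldl_nil, Option.getD_some]
  rw [PySem.List.index?_eq_idxOf?]
  simp only [List.idxOf?, List.findIdx?_cons, List.findIdx?_nil]
  by_cases h1 : o0 ≤ o1 ∧ o0 ≤ o2
  · have : min (min o0 o1) o2 = o0 := by omega
    rw [this]
    simp [h1]
  · by_cases h2 : o1 ≤ o2
    · have : min (min o0 o1) o2 = o1 := by omega
      have hne : ¬ (o0 == o1) := by simp; omega
      rw [this]
      simp [h1, h2, hne]
    · have : min (min o0 o1) o2 = o2 := by omega
      have hne0 : ¬ (o0 == o2) := by simp; omega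
      have hne1 : ¬ (o1 == o2) := by simp; omega
      rw [this]
      simp [h1, h2, hne0, hne1]

-- one appended element: A's step equals B's step on every state
theorem pvStep_eq (seq : List Int) : pvStepA seq = pvStepB seq := by
  simp only [pvStepA, pvStepB]
  have hh : (0:Int) ≤ PySem.Int.floordiv ((seq.length : Int) + 1) 2 := by
    rw [PySem.Int.floordiv_eq_ediv_of_pos (by omega)]; omega
  have hmem : ∀ i ∈ PySem.List.pyRange (PySem.Int.floordiv ((seq.length : Int) + 1) 2) 0 (-1),
      1 ≤ i ∧ 2 * i ≤ (seq.length : Int) + 1 := by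
    intro i hi
    rw [PySem.List.mem_pyRange_neg_one] at hi
    have h2i := hi.2
    rw [PySem.Int.floordiv_eq_ediv_of_pos (by omega)] at h2i
    omega
  have hscan : ∀ m, pvScanA seq ((seq.length : Int) + 1) m
      (PySem.List.pyRange (PySem.Int.floordiv ((seq.length : Int) + 1) 2) (-1) (-1)) =
      pvFM seq ((seq.length : Int) + 1) m
      (PySem.List.pyRange (PySem.Int.floordiv ((seq.length : Int) + 1) 2) 0 (-1)) := by
    intro m
    rw [pvRange_split _ hh, pvScanA_eq_pvFM]
  have h3 : PySem.List.pyRange 0 3 1 = [(0:Int), 1, 2] := by decide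
  rw [h3]
  simp only [List.foldl_cons, List.foldl_nil, List.nil_append, List.cons_append]
  rw [hscan 0, hscan 1, hscan 2, pvIdxMin3,
    pvFoldB_spec seq _ hmem 0 0 0]
  simp only [reduceIte]

-- ===== VERDICT (by name: the statement is the Claim_ definition above) =====
theorem a333325_spec : Claim_equal_a333325 := by
  intro n _
  unfold Spec_a333325 a333325 a333325_alt
  exact PySem.List.foldl_congr_mem _ _ _ _ (fun acc x _ => pvStep_eq acc)
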